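-- pv_equiv track=rewrite | github.com/donkirkby/vograbulary | wordpile/word_stairs.py | _get_overlap
-- ===== SOURCE A (Python) =====
-- def _get_overlap(word1, word2):
--     """ Returns the length of the overlap between word1 and word2.
--
--     The number of letters from the end of word1 that match the beginning of
--     word2.
--     """
--     max_overlap = min(len(word1), len(word2))
--     max_found = 0
--     for size in range(1, max_overlap+1):
--         suffix = word1[-size:]
--         prefix = word2[:size]
--         if suffix == prefix:
--             max_found = size
--     return max_found
-- ===== SOURCE B (Python) =====
-- def _get_overlap(word1, word2):
--     """Longest suffix of word1 that is a prefix of word2: scan sizes from the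
--     largest possible downward and return the first (hence maximal) match."""
--     n1 = len(word1)
--     for size in range(min(n1, len(word2)), 0, -1):
--         if word2.startswith(word1[n1 - size:]):
--             return size
--     return 0
-- ===== Notes on version B (the rewrite author's own statement) =====
-- stated objective: faster
-- what changed: A scans every overlap size ascending keeping the last match; B scans sizes descending and returns at the first match (the maximum), testing with startswith instead of comparing two slices, so it exits early when a large overlap exists.
import Mathlib
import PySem

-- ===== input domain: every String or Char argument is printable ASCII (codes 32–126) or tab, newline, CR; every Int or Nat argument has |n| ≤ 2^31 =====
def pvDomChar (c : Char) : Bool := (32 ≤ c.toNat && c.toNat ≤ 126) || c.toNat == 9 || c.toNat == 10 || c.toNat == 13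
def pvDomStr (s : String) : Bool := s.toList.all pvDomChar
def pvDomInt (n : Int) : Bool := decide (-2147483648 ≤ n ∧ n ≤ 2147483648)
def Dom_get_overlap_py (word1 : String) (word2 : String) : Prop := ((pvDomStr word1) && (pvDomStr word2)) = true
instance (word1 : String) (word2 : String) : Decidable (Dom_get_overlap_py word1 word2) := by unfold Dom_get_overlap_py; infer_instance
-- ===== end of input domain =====

-- B scans overlap sizes descending with early exit instead of A's full ascending scan; objective: alternative traversal.

-- ===== PORT A =====
-- literal port of A: for size in range(1, max_overlap+1): compare word1[-size:] with word2[:size], keep the last match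
def get_overlap_py (word1 : String) (word2 : String) : Int :=
  (PySem.List.pyRange 1 (min (word1.toList.length : Int) (word2.toList.length : Int) + 1) 1).foldl
    (fun max_found size =>
      if PySem.List.slice word1.toList (some (-size)) none
         = PySem.List.slice word2.toList none (some size)
      then size else max_found) 0

-- ===== PORT B =====
-- B's loop: for size in range(min(n1, n2), 0, -1): if word2.startswith(word1[n1-size:]): return size
def overlapDown (l1 l2 : List Char) (n1 : Nat) : Nat → Int
  | 0 => 0
  | size + 1 =>
    if PySem.Chars.startswith l2 (l1.drop (n1 - (size + 1))) then ((size : Int) + 1)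
    else overlapDown l1 l2 n1 size

def get_overlap_py_alt (word1 : String) (word2 : String) : Int :=
  overlapDown word1.toList word2.toList word1.toList.length
    (min word1.toList.length word2.toList.length)

-- ===== PRECONDITION & SPEC =====
def Spec_get_overlap_py (word1 : String) (word2 : String) (out : Int) : Prop := out = get_overlap_py_alt word1 word2
instance (word1 : String) (word2 : String) (out : Int) : Decidable (Spec_get_overlap_py word1 word2 out) := by unfold Spec_get_overlap_py; infer_instance

-- ===== CLAIM (what is proved, stated in full; the proofs are below) =====
def Claim_equal_get_overlap_py : Prop := ∀ (word1 : String) (word2 : String), Dom_get_overlap_py word1 word2 → Spec_get_overlap_py word1 word2 (get_overlap_py word1 word2)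

-- ===== LEMMAS AND PROOFS =====

-- reference form of B's loop with the bare drop/take comparison
def pvDown (l1 l2 : List Char) (n1 : Nat) : Nat → Int
  | 0 => 0
  | size + 1 =>
    if l1.drop (n1 - (size + 1)) = l2.take (size + 1) then ((size : Int) + 1)
    else pvDown l1 l2 n1 size

lemma overlapDown_eq_pvDown (l1 l2 : List Char) (n1 : Nat) (hn : n1 = l1.length) :
    ∀ m, m ≤ n1 → overlapDown l1 l2 n1 m = pvDown l1 l2 n1 m := by
  subst hn
  intro m
  induction m with
  | zero => intro _; rfl
  | succ k ih =>
    intro hm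
    have hlen : (l1.drop (l1.length - (k + 1))).length = k + 1 := by
      simp only [List.length_drop]; omega
    have hcond : (PySem.Chars.startswith l2 (l1.drop (l1.length - (k + 1))) = true)
        ↔ (l1.drop (l1.length - (k + 1)) = l2.take (k + 1)) := by
      rw [PySem.Chars.startswith_iff, List.prefix_iff_eq_take, hlen]
    simp only [overlapDown, pvDown]
    by_cases h : l1.drop (l1.length - (k + 1)) = l2.take (k + 1)
    · rw [if_pos (hcond.mpr h), if_pos h]
    · rw [if_neg (fun hc => h (hcond.mp hc)), if_neg h]
      exact ih (by omega)

lemma pvDown_eq_fold (l1 l2 : List Char) (n1 : Nat) :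
    ∀ m, pvDown l1 l2 n1 m =
      (List.range m).foldl
        (fun acc k => if l1.drop (n1 - (k + 1)) = l2.take (k + 1) then ((k : Int) + 1) else acc) 0 := by
  intro m
  induction m with
  | zero => rfl
  | succ k ih =>
    rw [List.range_succ, List.foldl_append]
    simp only [List.foldl_cons, List.foldl_nil, pvDown, ih]

lemma fold_main (l1 l2 : List Char) :
    (PySem.List.pyRange 1 (min (l1.length : Int) (l2.length : Int) + 1) 1).foldl
      (fun max_found size =>
        if PySem.List.slice l1 (some (-size)) none = PySem.List.slice l2 none (some size)
        then size else max_found) 0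
    = overlapDown l1 l2 l1.length (min l1.length l2.length) := by
  have hmin : min (l1.length : Int) (l2.length : Int) = ((min l1.length l2.length : Nat) : Int) := by
    simp
  rw [hmin, overlapDown_eq_pvDown l1 l2 l1.length rfl _ (Nat.min_le_left _ _), pvDown_eq_fold,
    PySem.List.pyRange_one,
    (by omega : (((min l1.length l2.length : Nat) : Int) + 1 - 1).toNat = min l1.length l2.length),
    List.foldl_map]
  congr 1
  funext acc k
  have h1 : PySem.List.slice l1 (some (-(1 + (k : Int)))) none
      = l1.drop (l1.length - (k + 1)) := by
    have he : -(1 + (k : Int)) = -(((k + 1 : Nat)) : Int) := by push_cast; ring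
    rw [he, PySem.List.slice_from_neg_natCast l1 (k + 1) (Nat.succ_pos k)]
  have h2 : PySem.List.slice l2 none (some (1 + (k : Int))) = l2.take (k + 1) := by
    have he : (1 + (k : Int)) = (((k + 1 : Nat)) : Int) := by push_cast; ring
    rw [he, PySem.List.slice_to_natCast]
  rw [h1, h2]
  by_cases h : l1.drop (l1.length - (k + 1)) = l2.take (k + 1)
  · rw [if_pos h, if_pos h]; omega
  · rw [if_neg h, if_neg h]

-- ===== VERDICT (by name: the statement is the Claim_ definition above) =====
theorem get_overlap_py_spec : Claim_equal_get_overlap_py := by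
  intro word1 word2 _
  unfold Spec_get_overlap_py get_overlap_py get_overlap_py_alt
  exact fold_main word1.toList word2.toList
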